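-- pv_equiv track=rewrite | github.com/rolandojf-gif/ai-intel-briefing-v3 | src/main.py | merge_briefings
-- ===== SOURCE A (Python) =====
-- def merge_briefings(briefs: list[dict]) -> dict:
--     out = {"signals": [], "risks": [], "watch": [], "entities_top": []}
--
--     for b in briefs:
--         for k in out.keys():
--             out[k].extend(b.get(k, []))
--
--     def dedup(seq):
--         seen = set()
--         res = []
--         for x in seq:
--             if x in seen:
--                 continue
--             seen.add(x)
--             res.append(x)
--         return res
--
--     out["signals"] = dedup(out["signals"])[:5]
--     out["risks"] = dedup(out["risks"])[:3]
--     out["watch"] = dedup(out["watch"])[:3]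
--     out["entities_top"] = dedup(out["entities_top"])[:5]
--     return out
-- ===== SOURCE B (Python) =====
-- def merge_briefings(briefs: list[dict]) -> dict:
--     # One fused pass: merge, dedup and cap each category while traversing briefs once.
--     limits = {"signals": 5, "risks": 3, "watch": 3, "entities_top": 5}
--     out = {k: [] for k in limits}
--     seen = {k: set() for k in limits}
--     for b in briefs:
--         for k, limit in limits.items():
--             res = out[k]
--             sk = seen[k]
--             for x in b.get(k, []):
--                 if x not in sk and len(res) < limit:
--                     sk.add(x)
--                     res.append(x)
--     return out
-- ===== Notes on version B (the rewrite author's own statement) =====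
-- stated objective: alternative
-- what changed: A merges everything per category, then runs a separate dedup pass and slices to the cap; B fuses merge, dedup and truncation into one traversal of the briefs, keeping a per-category seen-set and appending only while below the cap.
import Mathlib
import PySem

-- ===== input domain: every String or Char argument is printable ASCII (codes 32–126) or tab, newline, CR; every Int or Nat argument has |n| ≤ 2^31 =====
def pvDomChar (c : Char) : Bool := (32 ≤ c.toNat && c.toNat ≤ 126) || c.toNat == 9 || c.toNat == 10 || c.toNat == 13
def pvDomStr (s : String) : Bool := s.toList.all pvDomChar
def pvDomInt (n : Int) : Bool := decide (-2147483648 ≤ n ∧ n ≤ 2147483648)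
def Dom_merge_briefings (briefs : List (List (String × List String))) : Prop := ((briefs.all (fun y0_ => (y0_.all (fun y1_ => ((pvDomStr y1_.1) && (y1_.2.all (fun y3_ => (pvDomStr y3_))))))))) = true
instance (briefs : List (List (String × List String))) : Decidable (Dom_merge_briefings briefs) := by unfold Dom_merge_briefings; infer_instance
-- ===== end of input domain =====

-- ===== PORT A =====
-- B changes only the return value computation's structure; A mutates nothing observable.
-- b.get(k, []) : first-match lookup in the association list (Python dict lookup)
def pyGetK (b : List (String × List String)) (k : String) : List String :=
  (PySem.Dict.mk b).getD k []

-- A's dedup helper: seen set + result list, first occurrences kept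
def dedupStep (st : PySem.Set String × List String) (x : String) : PySem.Set String × List String :=
  if st.1.contains x then st else (st.1.add x, st.2 ++ [x])

def dedupA (seq : List String) : List String :=
  (seq.foldl dedupStep (PySem.Set.empty, [])).2

-- state = (signals, risks, watch, entities_top); the inner "for k in out.keys()" extends each
def mergeStepA (st : List String × List String × List String × List String)
    (b : List (String × List String)) :
    List String × List String × List String × List String :=
  (st.1 ++ pyGetK b "signals", st.2.1 ++ pyGetK b "risks",
   st.2.2.1 ++ pyGetK b "watch", st.2.2.2 ++ pyGetK b "entities_top")

def merge_briefings (briefs : List (List (String × List String))) : List (String × List String) :=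
  let out := briefs.foldl mergeStepA ([], [], [], [])
  [("signals", PySem.List.slice (dedupA out.1) none (some 5)),
   ("risks", PySem.List.slice (dedupA out.2.1) none (some 3)),
   ("watch", PySem.List.slice (dedupA out.2.2.1) none (some 3)),
   ("entities_top", PySem.List.slice (dedupA out.2.2.2) none (some 5))]

-- ===== PORT B =====
-- per-item step of B's fused pass: append only if unseen and below the cap
def capStep (limit : Nat) (st : List String × PySem.Set String) (x : String) :
    List String × PySem.Set String :=
  if !st.2.contains x && decide (st.1.length < limit) then (st.1 ++ [x], st.2.add x) else st

-- one brief's contribution to a category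
def capBrief (limit : Nat) (k : String) (st : List String × PySem.Set String)
    (b : List (String × List String)) : List String × PySem.Set String :=
  (pyGetK b k).foldl (capStep limit) st

-- state = ((res, seen) per category, in key order)
def mergeStepB
    (st : (List String × PySem.Set String) × (List String × PySem.Set String) ×
          (List String × PySem.Set String) × (List String × PySem.Set String))
    (b : List (String × List String)) :
    (List String × PySem.Set String) × (List String × PySem.Set String) ×
    (List String × PySem.Set String) × (List String × PySem.Set String) :=
  (capBrief 5 "signals" st.1 b, capBrief 3 "risks" st.2.1 b,
   capBrief 3 "watch" st.2.2.1 b, capBrief 5 "entities_top" st.2.2.2 b)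

def merge_briefings_alt (briefs : List (List (String × List String))) : List (String × List String) :=
  let st := briefs.foldl mergeStepB (([], PySem.Set.empty), ([], PySem.Set.empty),
                                     ([], PySem.Set.empty), ([], PySem.Set.empty))
  [("signals", st.1.1), ("risks", st.2.1.1), ("watch", st.2.2.1.1), ("entities_top", st.2.2.2.1)]

-- ===== PRECONDITION & SPEC =====
def Spec_merge_briefings (briefs : List (List (String × List String))) (out : List (String × List String)) : Prop := out = merge_briefings_alt briefs
instance (briefs : List (List (String × List String))) (out : List (String × List String)) : Decidable (Spec_merge_briefings briefs out) := by unfold Spec_merge_briefings; infer_instance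

-- ===== CLAIM (what is proved, stated in full; the proofs are below) =====
def Claim_equal_merge_briefings : Prop := ∀ (briefs : List (List (String × List String))), Dom_merge_briefings briefs → Spec_merge_briefings briefs (merge_briefings briefs)

-- ===== LEMMAS AND PROOFS =====

-- A's merge fold, componentwise: each component is init ++ flatMap of that key
theorem mergeStepA_foldl (briefs : List (List (String × List String)))
    (a b c d : List String) :
    briefs.foldl mergeStepA (a, b, c, d) =
      (a ++ briefs.flatMap (fun x => pyGetK x "signals"),
       b ++ briefs.flatMap (fun x => pyGetK x "risks"),
       c ++ briefs.flatMap (fun x => pyGetK x "watch"),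
       d ++ briefs.flatMap (fun x => pyGetK x "entities_top")) := by
  induction briefs generalizing a b c d with
  | nil => simp
  | cons hd tl ih => simp [mergeStepA, ih, List.append_assoc]

-- B's merge fold, componentwise
theorem mergeStepB_foldl (briefs : List (List (String × List String)))
    (s1 s2 s3 s4 : List String × PySem.Set String) :
    briefs.foldl mergeStepB (s1, s2, s3, s4) =
      (briefs.foldl (capBrief 5 "signals") s1,
       briefs.foldl (capBrief 3 "risks") s2,
       briefs.foldl (capBrief 3 "watch") s3,
       briefs.foldl (capBrief 5 "entities_top") s4) := by
  induction briefs generalizing s1 s2 s3 s4 with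
  | nil => rfl
  | cons hd tl ih => simp [mergeStepB, ih]

-- B's fold over briefs is a fold over the flattened per-key items
theorem capBrief_foldl (limit : Nat) (k : String) (briefs : List (List (String × List String)))
    (st : List String × PySem.Set String) :
    briefs.foldl (capBrief limit k) st =
      (briefs.flatMap (fun x => pyGetK x k)).foldl (capStep limit) st := by
  induction briefs generalizing st with
  | nil => rfl
  | cons hd tl ih => simp [capBrief, ih, List.foldl_append]

-- once the cap is reached, capStep never changes the state
theorem capStep_foldl_full (limit : Nat) (l : List String) (res : List String)
    (seen : PySem.Set String) (h : limit ≤ res.length) :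
    l.foldl (capStep limit) (res, seen) = (res, seen) := by
  induction l with
  | nil => rfl
  | cons x xs ih => simp [capStep, Nat.not_lt_of_le h, ih]

-- the dedup fold only appends: its result extends the initial res
theorem dedupStep_foldl_prefix (l : List String) (seen : PySem.Set String) (res : List String) :
    (l.foldl dedupStep (seen, res)).2 = res ++ (l.foldl dedupStep (seen, [])).2 := by
  induction l generalizing seen res with
  | nil => simp
  | cons x xs ih =>
    simp only [List.foldl_cons]
    by_cases hc : x ∈ seen
    · rw [show dedupStep (seen, res) x = (seen, res) by simp [dedupStep, hc],
          show dedupStep (seen, ([] : List String)) x = (seen, []) by simp [dedupStep, hc]]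
      exact ih seen res
    · rw [show dedupStep (seen, res) x = (seen.add x, res ++ [x]) by simp [dedupStep, hc],
          show dedupStep (seen, ([] : List String)) x = (seen.add x, [x]) by simp [dedupStep, hc]]
      rw [ih (seen.add x) (res ++ [x]), ih (seen.add x) [x]]
      simp [List.append_assoc]

-- core: fused capped pass = take limit of the dedup pass, over the same items
theorem cap_eq_take_dedup (limit : Nat) (l : List String) (seen : PySem.Set String)
    (res : List String) (h : res.length ≤ limit) :
    (l.foldl (capStep limit) (res, seen)).1 = List.take limit (l.foldl dedupStep (seen, res)).2 := by
  induction l generalizing seen res with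
  | nil => simpa using (List.take_of_length_le h).symm
  | cons x xs ih =>
    simp only [List.foldl_cons]
    by_cases hc : x ∈ seen
    · rw [show capStep limit (res, seen) x = (res, seen) by simp [capStep, hc],
          show dedupStep (seen, res) x = (seen, res) by simp [dedupStep, hc]]
      exact ih seen res h
    · by_cases hl : res.length < limit
      · rw [show capStep limit (res, seen) x = (res ++ [x], seen.add x) by simp [capStep, hc, hl],
            show dedupStep (seen, res) x = (seen.add x, res ++ [x]) by simp [dedupStep, hc]]
        exact ih (seen.add x) (res ++ [x]) (by simp; omega)
      · have hle : limit ≤ res.length := Nat.le_of_not_lt hl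
        have hlen : res.length = limit := Nat.le_antisymm h hle
        rw [show capStep limit (res, seen) x = (res, seen) by simp [capStep, hl],
            show dedupStep (seen, res) x = (seen.add x, res ++ [x]) by simp [dedupStep, hc]]
        rw [capStep_foldl_full limit xs res seen hle,
            dedupStep_foldl_prefix xs (seen.add x) (res ++ [x]), List.append_assoc]
        exact (List.take_left' hlen).symm

-- the per-key equality, packaged
theorem key_eq (limit : Nat) (items : List String) :
    (items.foldl (capStep limit) ([], PySem.Set.empty)).1 =
      PySem.List.slice (dedupA items) none (some (limit : Int)) := by
  rw [PySem.List.slice_to_natCast, dedupA]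
  exact cap_eq_take_dedup limit items PySem.Set.empty [] (by simp)

-- ===== VERDICT (by name: the statement is the Claim_ definition above) =====
theorem merge_briefings_spec : Claim_equal_merge_briefings := by
  intro briefs _
  show merge_briefings briefs = merge_briefings_alt briefs
  simp only [merge_briefings, merge_briefings_alt, mergeStepA_foldl, mergeStepB_foldl,
    capBrief_foldl, List.nil_append]
  have h5s := key_eq 5 (briefs.flatMap (fun x => pyGetK x "signals"))
  have h3r := key_eq 3 (briefs.flatMap (fun x => pyGetK x "risks"))
  have h3w := key_eq 3 (briefs.flatMap (fun x => pyGetK x "watch"))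
  have h5e := key_eq 5 (briefs.flatMap (fun x => pyGetK x "entities_top"))
  norm_num at h5s h3r h3w h5e
  simp [h5s, h3r, h3w, h5e]
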